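-- pv_equiv track=rewrite | github.com/0xShyam-Sec/VulnHive-AI | payload_engine.py | _randomise_case
-- ===== SOURCE A (Python) =====
-- def _randomise_case(s: str) -> str:
--     """Alternate upper/lower case for alphabetical characters."""
--     out: list[str] = []
--     toggle = False
--     for ch in s:
--         if ch.isalpha():
--             out.append(ch.upper() if toggle else ch.lower())
--             toggle = not toggle
--         else:
--             out.append(ch)
--     return "".join(out)
-- ===== SOURCE B (Python) =====
-- def _randomise_case(s: str) -> str:
--     """Alternate upper/lower case for alphabetical characters."""
--     letters = [ch for ch in s if ch.isalpha()]
--     cased = [ch.lower() if i % 2 == 0 else ch.upper() for i, ch in enumerate(letters)]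
--     it = iter(cased)
--     return "".join(next(it) if ch.isalpha() else ch for ch in s)
-- ===== Notes on version B (the rewrite author's own statement) =====
-- stated objective: alternative
-- what changed: Replaces the single-pass running case-toggle with two passes: first precompute the cased forms of just the alphabetic characters by enumerate-parity (lower at even index, upper at odd), then merge them back over the original string, leaving non-letters in place.
import Mathlib
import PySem

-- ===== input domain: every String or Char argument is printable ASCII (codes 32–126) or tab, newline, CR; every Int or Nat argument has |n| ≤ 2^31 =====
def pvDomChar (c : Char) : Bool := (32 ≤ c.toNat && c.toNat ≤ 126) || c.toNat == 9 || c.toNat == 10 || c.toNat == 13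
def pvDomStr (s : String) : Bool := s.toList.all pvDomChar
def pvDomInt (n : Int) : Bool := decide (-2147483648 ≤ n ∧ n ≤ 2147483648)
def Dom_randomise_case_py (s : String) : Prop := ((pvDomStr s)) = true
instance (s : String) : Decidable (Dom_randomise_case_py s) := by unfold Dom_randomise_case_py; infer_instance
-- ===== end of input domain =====

-- B replaces A's running case-toggle with a precomputed enumerate-parity cased letter list merged back over s (alternative decomposition, same cost).

-- ===== PORT A =====
-- out/toggle loop: append cased letter and flip toggle on alphabetic chars, copy others
def randomise_case_py (s : String) : String :=
  let st := s.toList.foldl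
    (fun (acc : List Char × Bool) ch =>
      if PySem.Chars.isalpha ch then
        (acc.1 ++ [if acc.2 then PySem.Chars.upperChar ch else PySem.Chars.lowerChar ch], !acc.2)
      else (acc.1 ++ [ch], acc.2))
    ([], false)
  String.mk st.1

-- ===== PORT B =====
-- merge pass: emit the next precomputed cased letter for each alphabetic char (= next(it)), others unchanged
def pvMergeBack : List Char → List Char → List Char
  | [], _ => []
  | ch :: rest, cs =>
    if PySem.Chars.isalpha ch then
      match cs with
      | d :: ds => d :: pvMergeBack rest ds
      | [] => []          -- iterator exhausted: unreachable by construction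
    else ch :: pvMergeBack rest cs

def randomise_case_py_alt (s : String) : String :=
  let letters := s.toList.filter PySem.Chars.isalpha
  let cased := (PySem.List.enumerate letters 0).map
    (fun p => if PySem.Int.mod p.1 2 == 0 then PySem.Chars.lowerChar p.2 else PySem.Chars.upperChar p.2)
  String.mk (pvMergeBack s.toList cased)

-- ===== PRECONDITION & SPEC =====
def Spec_randomise_case_py (s : String) (out : String) : Prop := out = randomise_case_py_alt s
instance (s : String) (out : String) : Decidable (Spec_randomise_case_py s out) := by unfold Spec_randomise_case_py; infer_instance

-- ===== CLAIM (what is proved, stated in full; the proofs are below) =====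
def Claim_equal_randomise_case_py : Prop := ∀ (s : String), Dom_randomise_case_py s → Spec_randomise_case_py s (randomise_case_py s)

-- ===== LEMMAS AND PROOFS =====

-- reference result of A's loop, as structural recursion over the character list
def pvCore : List Char → Bool → List Char
  | [], _ => []
  | ch :: rest, t =>
    if PySem.Chars.isalpha ch then
      (if t then PySem.Chars.upperChar ch else PySem.Chars.lowerChar ch) :: pvCore rest (!t)
    else ch :: pvCore rest t

theorem pvFoldA (l : List Char) : ∀ (acc : List Char) (t : Bool),
    (l.foldl
      (fun (acc : List Char × Bool) ch =>
        if PySem.Chars.isalpha ch then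
          (acc.1 ++ [if acc.2 then PySem.Chars.upperChar ch else PySem.Chars.lowerChar ch], !acc.2)
        else (acc.1 ++ [ch], acc.2))
      (acc, t)).1 = acc ++ pvCore l t := by
  induction l with
  | nil => intro acc t; simp [pvCore]
  | cons ch rest ih =>
    intro acc t
    by_cases h : PySem.Chars.isalpha ch = true <;> simp [List.foldl, h, pvCore, ih]

theorem pvMergeCore (l : List Char) : ∀ (n : Nat),
    pvMergeBack l ((PySem.List.enumerate (l.filter PySem.Chars.isalpha) (n : Int)).map
      (fun p => if PySem.Int.mod p.1 2 == 0 then PySem.Chars.lowerChar p.2 else PySem.Chars.upperChar p.2))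
      = pvCore l (n % 2 == 1) := by
  induction l with
  | nil => intro n; rfl
  | cons ch rest ih =>
    intro n
    by_cases h : PySem.Chars.isalpha ch = true
    · have hmod : PySem.Int.mod (n : Int) 2 = ((n % 2 : Nat) : Int) := PySem.Int.mod_natCast n 2
      have hcast : ((n : Int) + 1) = ((n + 1 : Nat) : Int) := by push_cast; ring
      have hflip : ((n + 1) % 2 == 1) = !(n % 2 == 1) := by
        rcases Nat.mod_two_eq_zero_or_one n with h0 | h1
        · simp [Nat.add_mod, h0]
        · simp [Nat.add_mod, h1]
      rw [List.filter_cons_of_pos h]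
      simp only [PySem.List.enumerate_cons, List.map_cons, pvMergeBack, pvCore, if_pos h,
        hmod, hcast, ih (n + 1), hflip]
      congr 1
      rcases Nat.mod_two_eq_zero_or_one n with h0 | h1
      · simp [h0]
      · simp [h1]
    · rw [List.filter_cons_of_neg (by simpa using h)]
      simp only [pvMergeBack, pvCore, if_neg h]
      rw [ih n]

-- ===== VERDICT (by name: the statement is the Claim_ definition above) =====
theorem randomise_case_py_spec : Claim_equal_randomise_case_py := by
  intro s _
  unfold Spec_randomise_case_py randomise_case_py randomise_case_py_alt
  simp only [pvFoldA, List.nil_append]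
  have h := pvMergeCore s.toList 0
  simp only [Nat.cast_zero] at h
  rw [h]
  rfl
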